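-- pv_equiv track=rewrite | github.com/wangyendt/LeetCode | Biweekly Contests/biweek 78/2271. Maximum White Tiles Covered by a Carpet/Maximum White Tiles Covered by a Carpet.py | maximumWhiteTiles
-- ===== SOURCE A (Python) =====
-- from typing import List
--
-- import bisect
--
-- def maximumWhiteTiles(tiles: List[List[int]], carpetLen: int) -> int:
--     tiles.sort(key=lambda x: x[0])
--     presum = [0]
--     res = []
--     for l, r in tiles:
--         presum.append(presum[-1] + r - l + 1)
--         res.append(l)
--         res.append(r)
--     ret = 0
--     for i, (l, r) in enumerate(tiles):
--         idx = bisect.bisect_right(x=l + carpetLen - 1, a=res)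
--         if idx >= len(res):
--             ret = max(ret, presum[-1] - presum[i])
--             break
--         m = idx // 2
--         cur = presum[m] - presum[i]
--         if idx & 1:
--             cur += l + carpetLen - 1 - tiles[m][0] + 1
--         ret = max(ret, cur)
--     return ret
-- ===== SOURCE B (Python) =====
-- from typing import List
--
-- import bisect
--
--
-- def maximumWhiteTiles(tiles: List[List[int]], carpetLen: int) -> int:
--     tiles.sort(key=lambda x: x[0])
--     n = len(tiles)
--     res = []
--     for l, r in tiles:
--         res.append(l)
--         res.append(r)
--     ret = 0
--     cover = 0
--     m = 0
--     for l, r in tiles: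
--         idx = bisect.bisect_right(res, l + carpetLen - 1)
--         if idx >= len(res):
--             while m < n:
--                 cover += tiles[m][1] - tiles[m][0] + 1
--                 m += 1
--             ret = max(ret, cover)
--             break
--         while m < idx // 2:
--             cover += tiles[m][1] - tiles[m][0] + 1
--             m += 1
--         cur = cover
--         if idx & 1:
--             cur += l + carpetLen - 1 - tiles[m][0] + 1
--         ret = max(ret, cur)
--         cover -= r - l + 1
--     return ret
-- ===== Notes on version B (the rewrite author's own statement) =====
-- stated objective: alternative
-- what changed: B drops A's prefix-sum array entirely: instead of presum lookups it maintains the covered length with a monotone pointer and a running sum, advanced incrementally per anchor (valid because the bisect index is monotone in its probe value).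
import Mathlib
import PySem

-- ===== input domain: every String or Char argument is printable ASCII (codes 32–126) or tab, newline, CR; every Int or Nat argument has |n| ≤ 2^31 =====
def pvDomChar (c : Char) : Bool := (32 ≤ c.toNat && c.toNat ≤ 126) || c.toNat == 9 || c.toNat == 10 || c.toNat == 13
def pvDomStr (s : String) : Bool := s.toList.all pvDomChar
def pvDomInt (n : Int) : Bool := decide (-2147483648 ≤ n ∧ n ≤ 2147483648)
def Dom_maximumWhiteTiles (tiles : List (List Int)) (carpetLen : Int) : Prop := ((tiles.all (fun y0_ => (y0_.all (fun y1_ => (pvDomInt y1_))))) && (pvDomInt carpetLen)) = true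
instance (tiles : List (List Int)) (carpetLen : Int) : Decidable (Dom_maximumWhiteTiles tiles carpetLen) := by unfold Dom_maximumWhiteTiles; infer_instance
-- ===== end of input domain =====

-- B drops A's prefix-sum list: it keeps the sorted-order bisect but maintains the covered
-- length with a monotone pointer and a running sum (objective: alternative decomposition).
-- Both A and B sort `tiles` in place (Python side); the equivalence proved here is about the return value.

-- ===== PORT A =====
-- one step of A's first loop: presum.append(presum[-1]+r-l+1); res.append(l); res.append(r)
def pvEndsStep (acc : List Int × List Int) (t : List Int) : List Int × List Int :=
  let l := PySem.List.pyGetD t 0 0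
  let r := PySem.List.pyGetD t 1 0
  (acc.1 ++ [PySem.List.pyGetD acc.1 (-1) 0 + r - l + 1], acc.2 ++ [l, r])

-- A's second loop over enumerate(tiles), with the early `break`
def pvLoopA (s : List (List Int)) (presum res : List Int) (c : Int) :
    List (Int × List Int) → Int → Int
  | [], ret => ret
  | (i, t) :: rest, ret =>
    let l := PySem.List.pyGetD t 0 0
    let idx := PySem.List.bisectRight res (l + c - 1)
    if res.length ≤ idx then
      max ret (PySem.List.pyGetD presum (-1) 0 - PySem.List.pyGetD presum i 0)
    else
      let m := idx / 2
      let cur := PySem.List.pyGetD presum (m : Int) 0 - PySem.List.pyGetD presum i 0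
      let cur := if idx % 2 = 1 then
          cur + (l + c - 1 - PySem.List.pyGetD (PySem.List.pyGetD s (m : Int) []) 0 0 + 1)
        else cur
      pvLoopA s presum res c rest (max ret cur)

def maximumWhiteTiles (tiles : List (List Int)) (carpetLen : Int) : Int :=
  let s := PySem.List.sorted tiles (fun x => PySem.List.pyGetD x 0 0)
  let pr := s.foldl pvEndsStep ([0], [])
  pvLoopA s pr.1 pr.2 carpetLen (PySem.List.enumerate s) 0

-- ===== PORT B =====
-- the `while m < bound` accumulation loops of B
def pvFill (s : List (List Int)) (bound m : Nat) (cover : Int) : Nat × Int :=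
  if h : m < bound then
    pvFill s bound (m + 1)
      (cover + (PySem.List.pyGetD (PySem.List.pyGetD s (m : Int) []) 1 0
                - PySem.List.pyGetD (PySem.List.pyGetD s (m : Int) []) 0 0 + 1))
  else (m, cover)
termination_by bound - m
decreasing_by omega

-- B's loop over enumerate(tiles), with the early `break`; state = (m, cover, ret)
def pvLoopB (s : List (List Int)) (res : List Int) (c : Int) :
    List (List Int) → Nat → Int → Int → Int
  | [], _m, _cover, ret => ret
  | t :: rest, m, cover, ret =>
    let l := PySem.List.pyGetD t 0 0
    let r := PySem.List.pyGetD t 1 0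
    let idx := PySem.List.bisectRight res (l + c - 1)
    if res.length ≤ idx then
      max ret (pvFill s s.length m cover).2
    else
      let mc := pvFill s (idx / 2) m cover
      let cur := mc.2
      let cur := if idx % 2 = 1 then
          cur + (l + c - 1 - PySem.List.pyGetD (PySem.List.pyGetD s (mc.1 : Int) []) 0 0 + 1)
        else cur
      pvLoopB s res c rest mc.1 (mc.2 - (r - l + 1)) (max ret cur)

def maximumWhiteTiles_alt (tiles : List (List Int)) (carpetLen : Int) : Int :=
  let s := PySem.List.sorted tiles (fun x => PySem.List.pyGetD x 0 0)
  let res := s.foldl (fun acc t =>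
    acc ++ [PySem.List.pyGetD t 0 0, PySem.List.pyGetD t 1 0]) []
  pvLoopB s res carpetLen s 0 0 0

-- ===== PRECONDITION & SPEC =====
-- Pre_ excludes exactly the inputs on which the Python A raises (ValueError):
-- an inner list that does not unpack as `l, r`, i.e. whose length is not 2.
def Pre_maximumWhiteTiles (tiles : List (List Int)) (carpetLen : Int) : Prop :=
  ∀ t ∈ tiles, t.length = 2

instance (tiles : List (List Int)) (carpetLen : Int) : Decidable (Pre_maximumWhiteTiles tiles carpetLen) := by
  unfold Pre_maximumWhiteTiles; infer_instance

def pvWitness_maximumWhiteTiles : List (List Int) × Int := ([[5, 7], [1, 3]], 3)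

def Spec_maximumWhiteTiles (tiles : List (List Int)) (carpetLen : Int) (out : Int) : Prop :=
  out = maximumWhiteTiles_alt tiles carpetLen
instance (tiles : List (List Int)) (carpetLen : Int) (out : Int) : Decidable (Spec_maximumWhiteTiles tiles carpetLen out) := by
  unfold Spec_maximumWhiteTiles; infer_instance

-- ===== CLAIM (what is proved, stated in full; the proofs are below) =====
def Claim_equal_maximumWhiteTiles : Prop := ∀ (tiles : List (List Int)) (carpetLen : Int), Dom_maximumWhiteTiles tiles carpetLen → Pre_maximumWhiteTiles tiles carpetLen → Spec_maximumWhiteTiles tiles carpetLen (maximumWhiteTiles tiles carpetLen)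

-- ===== LEMMAS AND PROOFS =====

-- endpoint accessors of a tile list
def pvFl (t : List Int) : Int := PySem.List.pyGetD t 0 0
def pvFr (t : List Int) : Int := PySem.List.pyGetD t 1 0
-- the flattened endpoint list [l0, r0, l1, r1, …]
def pvEnds (s : List (List Int)) : List Int := s.flatMap (fun t => [pvFl t, pvFr t])
-- index accessors
def pvTl (s : List (List Int)) (i : Nat) : Int := pvFl (s.getD i [])
def pvTr (s : List (List Int)) (i : Nat) : Int := pvFr (s.getD i [])
-- prefix sum of tile lengths: pvP s k = presum[k]
def pvP (s : List (List Int)) (k : Nat) : Int := ((s.take k).map (fun t => pvFr t - pvFl t + 1)).sum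

theorem pvEnds_length (s : List (List Int)) : (pvEnds s).length = 2 * s.length := by
  induction s with
  | nil => rfl
  | cons t ts ih => simp [pvEnds] at ih ⊢; omega

theorem pvP_succ (s : List (List Int)) (i : Nat) (h : i < s.length) :
    pvP s (i + 1) = pvP s i + (pvTr s i - pvTl s i + 1) := by
  unfold pvP pvTr pvTl
  rw [List.getD_eq_getElem _ _ h, List.map_take, List.map_take,
    List.sum_take_succ _ i (by simpa using h)]
  simp

theorem pvGetD_neg_one (xs : List Int) (d : Int) (h : xs ≠ []) :
    PySem.List.pyGetD xs (-1) d = xs.getD (xs.length - 1) d := by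
  have hl : xs.length ≠ 0 := by simpa using h
  simp [PySem.List.pyGetD, PySem.List.pyGet?, PySem.List.pyIdx?, List.getD]
  rw [if_pos (show 1 ≤ xs.length by omega)]
  simp

-- A's first loop builds ([0] ++ offsets, pvEnds s)
def pvOffsets : List (List Int) → Int → List Int
  | [], _ => []
  | t :: ts, b => (b + (pvFr t - pvFl t + 1)) :: pvOffsets ts (b + (pvFr t - pvFl t + 1))

theorem pvFold_build (s : List (List Int)) : ∀ (ps : List Int) (b : Int) (rs : List Int),
    s.foldl pvEndsStep (ps ++ [b], rs) = (ps ++ [b] ++ pvOffsets s b, rs ++ pvEnds s) := by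
  induction s with
  | nil => intro ps b rs; simp [pvEnds, pvOffsets]
  | cons t ts ih =>
    intro ps b rs
    have hstep : pvEndsStep (ps ++ [b], rs) t =
        ((ps ++ [b]) ++ [b + (pvFr t - pvFl t + 1)], rs ++ [pvFl t, pvFr t]) := by
      simp [pvEndsStep, pvFl, pvFr]
      ring
    rw [List.foldl_cons, hstep, ih]
    simp [pvOffsets, pvEnds]

-- B's res-building loop builds pvEnds s
theorem pvFold_ends (s : List (List Int)) : ∀ (rs : List Int),
    s.foldl (fun acc t =>
      acc ++ [PySem.List.pyGetD t 0 0, PySem.List.pyGetD t 1 0]) rs = rs ++ pvEnds s := by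
  induction s with
  | nil => intro rs; simp [pvEnds]
  | cons t ts ih => intro rs; rw [List.foldl_cons, ih]; simp [pvEnds, pvFl, pvFr]

theorem pvOffsets_length (s : List (List Int)) : ∀ b, (pvOffsets s b).length = s.length := by
  induction s with
  | nil => intro b; rfl
  | cons t ts ih => intro b; simp [pvOffsets, ih]

theorem pvP_cons (t : List Int) (ts : List (List Int)) (k : Nat) :
    pvP (t :: ts) (k + 1) = (pvFr t - pvFl t + 1) + pvP ts k := by
  simp [pvP]

theorem pvOffsets_getD (s : List (List Int)) : ∀ (b : Int) (k : Nat), k < s.length →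
    (pvOffsets s b).getD k 0 = b + pvP s (k + 1) := by
  induction s with
  | nil => intro b k h; simp at h
  | cons t ts ih =>
    intro b k h
    cases k with
    | zero => simp [pvOffsets, pvP]
    | succ m =>
      have := ih (b + (pvFr t - pvFl t + 1)) m (by simpa using h)
      simp only [pvOffsets, List.getD_cons_succ, this, pvP_cons]
      ring

theorem pvPresum_getD (s : List (List Int)) (k : Nat) (hk : k ≤ s.length) :
    (0 :: pvOffsets s 0).getD k 0 = pvP s k := by
  cases k with
  | zero => simp [pvP]
  | succ m => simpa using pvOffsets_getD s 0 m (by omega)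

theorem pvPresum_neg_one (s : List (List Int)) :
    PySem.List.pyGetD (0 :: pvOffsets s 0) (-1) 0 = pvP s s.length := by
  rw [pvGetD_neg_one _ _ (by simp)]
  cases hs : s with
  | nil => simp [pvOffsets, pvP]
  | cons t ts =>
    rw [← hs]
    have hlen : s.length ≠ 0 := by simp [hs]
    have : (0 :: pvOffsets s 0).length - 1 = (s.length - 1) + 1 := by
      simp [pvOffsets_length]; omega
    rw [this, List.getD_cons_succ, pvOffsets_getD s 0 (s.length - 1) (by omega)]
    have : s.length - 1 + 1 = s.length := by omega
    rw [this]; ring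

-- the binary-search loop stays inside [lo, hi] …
theorem pvBisectLoop_bounds (xs : List Int) (x : Int) : ∀ (fuel lo hi : Nat), lo ≤ hi →
    lo ≤ PySem.List.bisectRightLoop xs x fuel lo hi ∧
      PySem.List.bisectRightLoop xs x fuel lo hi ≤ hi := by
  intro fuel
  induction fuel with
  | zero => intro lo hi h; simp [PySem.List.bisectRightLoop]; omega
  | succ f ih =>
    intro lo hi h
    rw [PySem.List.bisectRightLoop]
    by_cases hlt : lo < hi
    · rw [if_pos hlt]
      cases hget : xs[(lo + hi) / 2]? with
      | none => dsimp only; omega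
      | some y =>
        dsimp only
        by_cases hx : x < y
        · rw [if_pos hx]
          have := ih lo ((lo + hi) / 2) (by omega)
          omega
        · rw [if_neg hx]
          have := ih ((lo + hi) / 2 + 1) hi (by omega)
          omega
    · rw [if_neg hlt]; omega

-- … and is monotone in the probe value, sorted input or not
theorem pvBisectLoop_mono (xs : List Int) (x y : Int) (hxy : x ≤ y) :
    ∀ (fuel lo hi : Nat), lo ≤ hi →
    PySem.List.bisectRightLoop xs x fuel lo hi ≤ PySem.List.bisectRightLoop xs y fuel lo hi := by
  intro fuel
  induction fuel with
  | zero => intro lo hi h; simp [PySem.List.bisectRightLoop]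
  | succ f ih =>
    intro lo hi h
    rw [PySem.List.bisectRightLoop, PySem.List.bisectRightLoop]
    by_cases hlt : lo < hi
    · rw [if_pos hlt, if_pos hlt]
      cases hget : xs[(lo + hi) / 2]? with
      | none => dsimp only; omega
      | some a =>
        dsimp only
        by_cases hx : x < a
        · rw [if_pos hx]
          by_cases hy : y < a
          · rw [if_pos hy]
            exact ih lo ((lo + hi) / 2) (by omega)
          · rw [if_neg hy]
            have h1 := pvBisectLoop_bounds xs x f lo ((lo + hi) / 2) (by omega)
            have h2 := pvBisectLoop_bounds xs y f ((lo + hi) / 2 + 1) hi (by omega)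
            omega
        · rw [if_neg hx]
          have hy : ¬ y < a := by omega
          rw [if_neg hy]
          exact ih ((lo + hi) / 2 + 1) hi (by omega)
    · rw [if_neg hlt, if_neg hlt]

theorem pvBisect_le_length (xs : List Int) (x : Int) :
    PySem.List.bisectRight xs x ≤ xs.length :=
  (pvBisectLoop_bounds xs x xs.length 0 xs.length (by omega)).2

theorem pvBisect_mono (xs : List Int) (x y : Int) (hxy : x ≤ y) :
    PySem.List.bisectRight xs x ≤ PySem.List.bisectRight xs y :=
  pvBisectLoop_mono xs x y hxy xs.length 0 xs.length (by omega)

-- left endpoints are nondecreasing along the sorted list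
theorem pvTl_mono (s : List (List Int)) (hkey : (s.map pvFl).Pairwise (· ≤ ·))
    (i j : Nat) (hij : i ≤ j) (hj : j < s.length) : pvTl s i ≤ pvTl s j := by
  rcases Nat.eq_or_lt_of_le hij with rfl | hlt
  · exact le_refl _
  · have hi : i < s.length := by omega
    have h := List.pairwise_iff_getElem.mp hkey i j (by simpa using hi) (by simpa using hj) hlt
    unfold pvTl
    rw [List.getD_eq_getElem _ _ hi, List.getD_eq_getElem _ _ hj]
    simpa using h

-- B's accumulation loop: running sum of lengths = difference of A's prefix sums
theorem pvFill_spec (s : List (List Int)) (bound : Nat) (hb : bound ≤ s.length) :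
    ∀ (d m : Nat) (cover : Int), m + d = bound →
    pvFill s bound m cover = (bound, cover + (pvP s bound - pvP s m)) := by
  intro d
  induction d with
  | zero =>
    intro m cover hm
    rw [pvFill, dif_neg (by omega)]
    have : m = bound := by omega
    subst this; simp
  | succ d ih =>
    intro m cover hm
    have hmn : m < s.length := by omega
    rw [pvFill, dif_pos (by omega : m < bound), ih (m + 1) _ (by omega)]
    have hps := pvP_succ s m hmn
    rw [PySem.List.pyGetD_natCast]
    refine congrArg _ ?_
    unfold pvTr pvTl pvFr pvFl at hps
    omega

-- the two loops agree step by step: cover = pvP m − pvP i, and m never exceeds idx/2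
theorem pvLoop_eq (s : List (List Int)) (c : Int)
    (hkey : (s.map pvFl).Pairwise (· ≤ ·)) :
    ∀ (fuel i m : Nat) (cover ret : Int), i + fuel = s.length → m ≤ s.length →
    cover = pvP s m - pvP s i →
    (fuel ≠ 0 →
      m ≤ (PySem.List.bisectRight (pvEnds s) (pvTl s i + c - 1)) / 2) →
    pvLoopA s (0 :: pvOffsets s 0) (pvEnds s) c (PySem.List.enumerate (s.drop i) (i : Int)) ret =
      pvLoopB s (pvEnds s) c (s.drop i) m cover ret := by
  intro fuel
  induction fuel with
  | zero =>
    intro i m cover ret h1 h2 h3 h4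
    have : s.drop i = [] := by rw [List.drop_eq_nil_iff]; omega
    rw [this]
    simp [pvLoopA, pvLoopB, PySem.List.enumerate]
  | succ f ih =>
    intro i m cover ret h1 h2 h3 h4
    have hi : i < s.length := by omega
    have hdrop : s.drop i = s[i] :: s.drop (i + 1) := (List.getElem_cons_drop hi).symm
    rw [hdrop]
    have henum : PySem.List.enumerate (s[i] :: s.drop (i + 1)) (i : Int) =
        ((i : Int), s[i]) :: PySem.List.enumerate (s.drop (i + 1)) ((i : Int) + 1) := by
      simp [PySem.List.enumerate]
    rw [henum, ← hdrop, hdrop]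
    have hgetsi : PySem.List.pyGetD s[i] 0 0 = pvTl s i := by
      unfold pvTl pvFl
      rw [List.getD_eq_getElem _ _ hi]
    set e : Int := pvTl s i + c - 1 with he
    set idx : Nat := PySem.List.bisectRight (pvEnds s) e with hidx
    have hidxle : idx ≤ 2 * s.length := by
      rw [hidx, ← pvEnds_length s]; exact pvBisect_le_length _ _
    have hm : m ≤ idx / 2 := by rw [hidx, he]; exact h4 (by omega)
    simp only [pvLoopA, pvLoopB, hgetsi, ← he, ← hidx, pvEnds_length s]
    by_cases hbr : 2 * s.length ≤ idx
    · rw [if_pos hbr, if_pos hbr]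
      rw [pvFill_spec s s.length (le_refl _) (s.length - m) m cover (by omega)]
      have hpi : PySem.List.pyGetD (0 :: pvOffsets s 0) (i : Int) 0 = pvP s i := by
        rw [PySem.List.pyGetD_natCast, pvPresum_getD s i (by omega)]
      rw [hpi, pvPresum_neg_one s]
      have : cover + (pvP s s.length - pvP s m) = pvP s s.length - pvP s i := by omega
      rw [this]
    · rw [if_neg hbr, if_neg hbr]
      have hhalf : idx / 2 ≤ s.length := by omega
      rw [pvFill_spec s (idx / 2) hhalf (idx / 2 - m) m cover (by omega)]
      have hcov : cover + (pvP s (idx / 2) - pvP s m) = pvP s (idx / 2) - pvP s i := by omega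
      have hpi : PySem.List.pyGetD (0 :: pvOffsets s 0) (i : Int) 0 = pvP s i := by
        rw [PySem.List.pyGetD_natCast, pvPresum_getD s i (by omega)]
      have hpm : PySem.List.pyGetD (0 :: pvOffsets s 0) ((idx / 2 : Nat) : Int) 0 =
          pvP s (idx / 2) := by
        rw [PySem.List.pyGetD_natCast, pvPresum_getD s (idx / 2) hhalf]
      simp only [hcov, hpi, hpm]
      have hri : PySem.List.pyGetD s[i] 1 0 = pvTr s i := by
        unfold pvTr pvFr
        rw [List.getD_eq_getElem _ _ hi]
      have hcovnext : pvP s (idx / 2) - pvP s i -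
          (PySem.List.pyGetD s[i] 1 0 - pvTl s i + 1) =
          pvP s (idx / 2) - pvP s (i + 1) := by
        rw [hri]
        have := pvP_succ s i hi
        omega
      rw [hcovnext]
      have hcast : ((i : Int) + 1) = (((i + 1 : Nat)) : Int) := by push_cast; ring
      rw [hcast]
      exact ih (i + 1) (idx / 2) _ _ (by omega) hhalf rfl (fun hf => by
        have hi1 : i + 1 < s.length := by omega
        have hee : e ≤ pvTl s (i + 1) + c - 1 := by
          have := pvTl_mono s hkey i (i + 1) (by omega) hi1
          omega
        have := pvBisect_mono (pvEnds s) e (pvTl s (i + 1) + c - 1) hee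
        have := Nat.div_le_div_right (c := 2) this
        omega)

-- ===== VERDICT (by name: the statement is the Claim_ definition above) =====
theorem maximumWhiteTiles_spec : Claim_equal_maximumWhiteTiles := by
  intro tiles c _hdom _hpre
  unfold Spec_maximumWhiteTiles maximumWhiteTiles maximumWhiteTiles_alt
  set s := PySem.List.sorted tiles (fun x => PySem.List.pyGetD x 0 0) with hs
  have hkey : (s.map pvFl).Pairwise (· ≤ ·) := by
    have := PySem.List.sorted_map_key_pairwise (xs := tiles)
      (key := fun x => PySem.List.pyGetD x 0 0)
    simpa [pvFl, hs] using this
  have hfold : s.foldl pvEndsStep ([0], []) = (0 :: pvOffsets s 0, pvEnds s) := by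
    have := pvFold_build s [] 0 []
    simpa using this
  have hres : s.foldl (fun acc t =>
      acc ++ [PySem.List.pyGetD t 0 0, PySem.List.pyGetD t 1 0]) [] = pvEnds s := by
    simpa using pvFold_ends s []
  simp only [hfold, hres]
  have h0 : PySem.List.enumerate s 0 = PySem.List.enumerate (s.drop 0) ((0 : Nat) : Int) := by
    simp
  rw [h0]
  have := pvLoop_eq s c hkey s.length 0 0 0 0 (by omega) (by omega) (by simp [pvP])
    (fun _ => by omega)
  simpa using this
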